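-- pv_equiv track=rewrite | github.com/berndprach/OneLipschitzLayersCompared | src/run_logging/line_formatter/format_value.py | keep_first_digits_only
-- ===== SOURCE A (Python) =====
-- def keep_first_digits_only(value, max_precision):
--     value_str = ""
--     digits_seen = 0
--     for d in str(value):
--         if d.isdigit() and digits_seen >= max_precision:
--             value_str += "0"
--         else:
--             value_str += d
--         if d.isdigit():
--             digits_seen += 1
--     return value_str
-- ===== SOURCE B (Python) =====
-- def keep_first_digits_only(value, max_precision):
--     s = str(value)
--     chars = list(s)
--     digit_positions = [i for i, c in enumerate(s) if c.isdigit()]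
--     for rank, pos in enumerate(digit_positions):
--         if rank >= max_precision:
--             chars[pos] = '0'
--     return ''.join(chars)
-- ===== Notes on version B (the rewrite author's own statement) =====
-- stated objective: alternative
-- what changed: Replaces A's single pass with a running digit counter and incremental string concatenation by an index-table decomposition: first build the list of digit positions, then overwrite with '0' the positions whose enumerate rank is >= max_precision in a mutable char list.
import Mathlib
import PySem

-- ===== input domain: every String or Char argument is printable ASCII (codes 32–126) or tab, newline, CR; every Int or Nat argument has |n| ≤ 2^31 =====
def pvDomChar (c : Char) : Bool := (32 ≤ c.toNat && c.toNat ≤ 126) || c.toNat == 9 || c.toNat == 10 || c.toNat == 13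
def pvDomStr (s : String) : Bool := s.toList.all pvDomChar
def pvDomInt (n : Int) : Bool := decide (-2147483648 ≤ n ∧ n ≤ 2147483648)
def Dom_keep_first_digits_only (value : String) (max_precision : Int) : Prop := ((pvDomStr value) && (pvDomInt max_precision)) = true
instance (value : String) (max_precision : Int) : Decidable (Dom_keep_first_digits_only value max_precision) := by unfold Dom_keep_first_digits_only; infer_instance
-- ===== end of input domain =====

-- ===== PORT A =====
-- B replaces A's running-counter pass by a digit-position index table plus a mutation pass (alternative decomposition, same cost class).
-- Loop body of A: append '0' or the char, bump digits_seen on digits.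
def pvStepA (mp : Int) (st : List Char × Int) (d : Char) : List Char × Int :=
  (if PySem.Chars.isdigit d && decide (st.2 ≥ mp) then st.1 ++ ['0'] else st.1 ++ [d],
   if PySem.Chars.isdigit d then st.2 + 1 else st.2)

-- Port of A: one pass over str(value) with state (value_str as List Char, digits_seen).
def keep_first_digits_only (value : String) (max_precision : Int) : String :=
  String.ofList (value.toList.foldl (pvStepA max_precision) ([], 0)).1

-- ===== PORT B =====
-- [i for i, c in enumerate(s) if c.isdigit()]
def pvDigitPositions (cs : List Char) (start : Int) : List Int :=
  ((PySem.List.enumerate cs start).filter (fun p => PySem.Chars.isdigit p.2)).map (·.1)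

-- Loop body of B: chars[pos] = '0' when rank ≥ max_precision.
def pvStepB (mp : Int) (cs : List Char) (rp : Int × Int) : List Char :=
  if rp.1 ≥ mp then PySem.List.pySetD cs rp.2 '0' else cs

-- Port of B: build the digit-position table, then the mutation pass over its enumerate.
def keep_first_digits_only_alt (value : String) (max_precision : Int) : String :=
  String.ofList ((PySem.List.enumerate (pvDigitPositions value.toList 0) 0).foldl
    (pvStepB max_precision) value.toList)

-- ===== PRECONDITION & SPEC =====
def Spec_keep_first_digits_only (value : String) (max_precision : Int) (out : String) : Prop := out = keep_first_digits_only_alt value max_precision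
instance (value : String) (max_precision : Int) (out : String) : Decidable (Spec_keep_first_digits_only value max_precision out) := by unfold Spec_keep_first_digits_only; infer_instance

-- ===== CLAIM (what is proved, stated in full; the proofs are below) =====
def Claim_equal_keep_first_digits_only : Prop := ∀ (value : String) (max_precision : Int), Dom_keep_first_digits_only value max_precision → Spec_keep_first_digits_only value max_precision (keep_first_digits_only value max_precision)

-- ===== LEMMAS AND PROOFS =====

-- Common middle form: structural recursion carrying the digit counter.
def pvMid (mp : Int) : List Char → Int → List Char
  | [], _ => []
  | c :: cs, k =>
    (if PySem.Chars.isdigit c && decide (k ≥ mp) then '0' else c) ::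
      pvMid mp cs (if PySem.Chars.isdigit c then k + 1 else k)

theorem pvA_foldl (mp : Int) (cs : List Char) (acc : List Char) (k : Int) :
    (cs.foldl (pvStepA mp) (acc, k)).1 = acc ++ pvMid mp cs k := by
  induction cs generalizing acc k with
  | nil => simp [pvMid]
  | cons c cs ih =>
    rw [List.foldl_cons]
    have h : pvStepA mp (acc, k) c =
        (acc ++ [if PySem.Chars.isdigit c && decide (k ≥ mp) then '0' else c],
         if PySem.Chars.isdigit c then k + 1 else k) := by
      by_cases h1 : (PySem.Chars.isdigit c && decide (k ≥ mp)) = true <;>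
        by_cases h2 : PySem.Chars.isdigit c <;> simp [pvStepA, h1, h2] <;> split_ifs <;> simp
    rw [h, ih]
    conv_rhs => rw [pvMid]
    simp

theorem pvDigitPositions_cons (c : Char) (cs : List Char) (i : Int) :
    pvDigitPositions (c :: cs) i =
      if PySem.Chars.isdigit c then i :: pvDigitPositions cs (i + 1)
      else pvDigitPositions cs (i + 1) := by
  by_cases hd : PySem.Chars.isdigit c <;>
    simp [pvDigitPositions, PySem.List.enumerate_cons, hd]

theorem pvDigitPositions_shift (cs : List Char) (i : Int) :
    pvDigitPositions cs (i + 1) = (pvDigitPositions cs i).map (· + 1) := by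
  induction cs generalizing i with
  | nil => simp [pvDigitPositions]
  | cons c cs ih =>
    rw [pvDigitPositions_cons, pvDigitPositions_cons]
    by_cases hd : PySem.Chars.isdigit c <;> simp [hd, ih]

theorem pvDigitPositions_nonneg (cs : List Char) (i : Int) :
    ∀ p ∈ pvDigitPositions cs i, i ≤ p := by
  induction cs generalizing i with
  | nil => simp [pvDigitPositions]
  | cons c cs ih =>
    rw [pvDigitPositions_cons]
    intro p hp
    by_cases hd : PySem.Chars.isdigit c <;> simp [hd] at hp
    · rcases hp with rfl | hp
      · exact le_refl _
      · have := ih (i + 1) p hp; omega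
    · have := ih (i + 1) p hp; omega

theorem pvEnumerate_map {α β : Type} (f : α → β) (l : List α) (j : Int) :
    PySem.List.enumerate (l.map f) j =
      (PySem.List.enumerate l j).map (fun q => (q.1, f q.2)) := by
  induction l generalizing j with
  | nil => simp [PySem.List.enumerate_nil]
  | cons x xs ih => simp [PySem.List.enumerate_cons, ih]

theorem pvSetD_cons (x : Char) (xs : List Char) (p : Int) (hp : 1 ≤ p) (v : Char) :
    PySem.List.pySetD (x :: xs) p v = x :: PySem.List.pySetD xs (p - 1) v := by
  rw [PySem.List.pySetD_of_nonneg _ _ (by omega), PySem.List.pySetD_of_nonneg _ _ (by omega)]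
  have : p.toNat = (p - 1).toNat + 1 := by omega
  rw [this]
  rfl

theorem pvFold_shift (mp : Int) (x : Char) (xs : List Char)
    (ps : List (Int × Int)) (hps : ∀ q ∈ ps, 0 ≤ q.2) :
    (ps.map (fun q => (q.1, q.2 + 1))).foldl (pvStepB mp) (x :: xs)
    = x :: ps.foldl (pvStepB mp) xs := by
  induction ps generalizing xs with
  | nil => simp
  | cons q qs ih =>
    simp only [List.map_cons, List.foldl_cons]
    have h1 : pvStepB mp (x :: xs) (q.1, q.2 + 1) = x :: pvStepB mp xs q := by
      unfold pvStepB
      by_cases hm : q.1 ≥ mp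
      · rw [if_pos hm, if_pos hm,
          pvSetD_cons _ _ _ (by have := hps q (by simp); omega), add_sub_cancel_right]
      · rw [if_neg hm, if_neg hm]
    rw [h1]
    exact ih (pvStepB mp xs q) (fun r hr => hps r (by simp [hr]))

theorem pvEnumerate_pos_nonneg (cs : List Char) (j : Int)
    (q : Int × Int) (hq : q ∈ PySem.List.enumerate (pvDigitPositions cs 0) j) :
    0 ≤ q.2 := by
  have h2 : q.2 ∈ (PySem.List.enumerate (pvDigitPositions cs 0) j).map (·.2) :=
    List.mem_map_of_mem hq
  rw [PySem.List.map_snd_enumerate] at h2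
  exact pvDigitPositions_nonneg cs 0 _ h2

theorem pvB_fold (mp : Int) (cs : List Char) (j : Int) :
    (PySem.List.enumerate (pvDigitPositions cs 0) j).foldl (pvStepB mp) cs
    = pvMid mp cs j := by
  induction cs generalizing j with
  | nil => simp [pvDigitPositions, pvMid, PySem.List.enumerate_nil]
  | cons c cs ih =>
    have hrest : ∀ (x : Char) (j' : Int),
        (PySem.List.enumerate (pvDigitPositions cs (0 + 1)) j').foldl
          (pvStepB mp) (x :: cs)
        = x :: pvMid mp cs j' := by
      intro x j'
      rw [pvDigitPositions_shift cs 0, pvEnumerate_map,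
        pvFold_shift mp x cs _ (fun q hq => pvEnumerate_pos_nonneg cs j' q hq),
        ih]
    rw [pvDigitPositions_cons]
    by_cases hd : PySem.Chars.isdigit c
    · rw [if_pos hd, PySem.List.enumerate_cons, List.foldl_cons]
      have h0 : pvStepB mp (c :: cs) (j, 0) = (if j ≥ mp then '0' else c) :: cs := by
        unfold pvStepB
        by_cases hm : j ≥ mp
        · rw [if_pos hm, if_pos hm, PySem.List.pySetD_of_nonneg _ _ (by omega)]; rfl
        · rw [if_neg hm, if_neg hm]
      rw [h0, hrest]
      conv_rhs => rw [pvMid]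
      by_cases hm : j ≥ mp <;> simp [hd, hm]
    · rw [if_neg hd, hrest c j]
      conv_rhs => rw [pvMid]
      simp [hd]

-- ===== VERDICT (by name: the statement is the Claim_ definition above) =====
theorem keep_first_digits_only_spec : Claim_equal_keep_first_digits_only := by
  intro value mp _
  unfold Spec_keep_first_digits_only keep_first_digits_only keep_first_digits_only_alt
  rw [pvA_foldl mp value.toList [] 0, pvB_fold mp value.toList 0]
  simp
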